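-- pv_equiv track=rewrite | github.com/WwzFwz/finoss-cobol-intel | src/cobol_intel/parsers/preprocessor.py | _handle_fixed_format
-- ===== SOURCE A (Python) =====
-- def _handle_fixed_format(
--     lines: list[str], warnings: list[str]
-- ) -> list[str]:
--     """Process fixed-format COBOL lines."""
--     result: list[str] = []
--
--     for i, line in enumerate(lines):
--         # Pad short lines
--         padded = line.ljust(80) if len(line) < 80 else line
--
--         # Column 7: indicator
--         if len(padded) >= 7:
--             indicator = padded[6]
--         else:
--             indicator = " "
--
--         # Comment line: skip
--         if indicator in ("*", "/"):
--             continue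
--
--         # Extract source area (columns 8-72, 0-indexed: 7-71)
--         source_area = padded[7:72].rstrip()
--
--         # Skip empty source area
--         if not source_area.strip():
--             continue
--
--         # Continuation line: append to previous
--         if indicator == "-" and result:
--             # Remove leading spaces and append
--             continued = source_area.lstrip()
--             result[-1] = result[-1] + continued
--         else:
--             result.append(source_area)
--
--     return result
-- ===== SOURCE B (Python) =====
-- def _handle_fixed_format(
--     lines: list[str], warnings: list[str]
-- ) -> list[str]:
--     """Process fixed-format COBOL lines (two passes: extract units, then merge continuations by grouping)."""
--     # Pass 1: keep (indicator, source_area) for every non-comment, non-blank line.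
--     units = []
--     for line in lines:
--         padded = line.ljust(80)
--         indicator = padded[6]
--         if indicator == "*" or indicator == "/":
--             continue
--         source_area = padded[7:72].rstrip()
--         if source_area:
--             units.append((indicator, source_area))
--
--     # Pass 2: group each unit with the continuation units that follow it, join each group.
--     result = []
--     group = None
--     for indicator, source_area in units:
--         if indicator == "-" and group is not None:
--             group.append(source_area.lstrip())
--         else:
--             if group is not None:
--                 result.append("".join(group))
--             group = [source_area]
--     if group is not None:
--         result.append("".join(group))
--     return result
-- ===== Notes on version B (the rewrite author's own statement) =====
-- stated objective: alternative
-- what changed: A's single loop that interleaves comment/blank filtering with in-place mutation of result[-1] is split into two passes: pass 1 extracts (indicator, source_area) units, pass 2 groups each unit with its following continuation lines and emits each group as one ''.join, so no element of the result list is ever rewritten.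
import Mathlib
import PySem

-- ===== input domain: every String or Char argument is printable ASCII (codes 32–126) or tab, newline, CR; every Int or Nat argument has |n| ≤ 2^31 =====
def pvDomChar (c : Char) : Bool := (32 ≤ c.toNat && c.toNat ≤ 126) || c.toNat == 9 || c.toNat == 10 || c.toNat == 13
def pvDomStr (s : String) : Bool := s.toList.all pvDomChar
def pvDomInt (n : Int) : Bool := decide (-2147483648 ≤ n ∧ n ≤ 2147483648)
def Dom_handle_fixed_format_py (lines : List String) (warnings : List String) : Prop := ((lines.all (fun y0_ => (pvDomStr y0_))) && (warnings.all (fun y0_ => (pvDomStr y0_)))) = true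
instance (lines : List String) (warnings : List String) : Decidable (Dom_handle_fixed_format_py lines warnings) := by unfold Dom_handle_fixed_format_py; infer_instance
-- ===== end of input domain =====

-- ===== PORT A =====
-- B reorganises A's single interleaved loop into two passes (extract units, then merge
-- continuation groups and join); objective: alternative decomposition, same cost.
-- A-side helper: the body of A's for-loop (state = the growing result list of char-lists).
def pvStepA (result : List (List Char)) (line : String) : List (List Char) :=
  let cs := line.toList
  -- line.ljust(80) if len(line) < 80 else line  (ljust hand-ported: pad right with spaces; exact)
  let padded := if cs.length < 80 then cs ++ List.replicate (80 - cs.length) ' ' else cs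
  -- indicator = padded[6] if len(padded) >= 7 else " "  (index in range under the guard)
  let indicator := if 7 ≤ padded.length then padded.getD 6 ' ' else ' '
  if indicator == '*' || indicator == '/' then result
  else
    let source_area := PySem.Chars.rstrip (PySem.List.slice padded (some 7) (some 72))
    if PySem.Chars.strip source_area == ([] : List Char) then result
    else if indicator == '-' && !result.isEmpty then
      -- result[-1] = result[-1] + continued  (list nonempty under the guard)
      result.dropLast ++ [result.getLastD [] ++ PySem.Chars.lstrip source_area]
    else result ++ [source_area]

def handle_fixed_format_py (lines : List String) (_warnings : List String) : List String :=
  (lines.foldl pvStepA []).map (fun cs => String.ofList cs)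

-- ===== PORT B =====
-- B pass 1: (indicator, source_area) of a line, or none for comment/blank lines.
def pvExtract (line : String) : Option (Char × List Char) :=
  let padded := line.toList ++ List.replicate (80 - line.toList.length) ' '  -- line.ljust(80); exact
  let indicator := padded.getD 6 ' '  -- padded[6]; padded has length ≥ 80, so the default is never used
  if indicator == '*' || indicator == '/' then none
  else
    let source_area := PySem.Chars.rstrip (PySem.List.slice padded (some 7) (some 72))
    if source_area == ([] : List Char) then none else some (indicator, source_area)

-- B pass 2: state = (finished groups already joined, the currently open group of pieces or none).
def pvMerge (st : List (List Char) × Option (List (List Char))) (u : Char × List Char) :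
    List (List Char) × Option (List (List Char)) :=
  if u.1 == '-' && st.2.isSome then
    (st.1, st.2.map (fun g => g ++ [PySem.Chars.lstrip u.2]))
  else
    ((match st.2 with | none => st.1 | some g => st.1 ++ [PySem.Chars.join [] g]), some [u.2])

-- flush the open group ("".join(group)) onto the result
def pvFlush (st : List (List Char) × Option (List (List Char))) : List (List Char) :=
  match st.2 with | none => st.1 | some g => st.1 ++ [PySem.Chars.join [] g]

def handle_fixed_format_py_alt (lines : List String) (_warnings : List String) : List String :=
  (pvFlush ((lines.filterMap pvExtract).foldl pvMerge ([], none))).map (fun cs => String.ofList cs)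

-- ===== PRECONDITION & SPEC =====
def Spec_handle_fixed_format_py (lines : List String) (warnings : List String) (out : List String) : Prop := out = handle_fixed_format_py_alt lines warnings
instance (lines : List String) (warnings : List String) (out : List String) : Decidable (Spec_handle_fixed_format_py lines warnings out) := by unfold Spec_handle_fixed_format_py; infer_instance

-- ===== CLAIM (what is proved, stated in full; the proofs are below) =====
def Claim_equal_handle_fixed_format_py : Prop := ∀ (lines : List String) (warnings : List String), Dom_handle_fixed_format_py lines warnings → Spec_handle_fixed_format_py lines warnings (handle_fixed_format_py lines warnings)

-- ===== LEMMAS AND PROOFS =====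

-- "".join on char-lists is flatten
lemma pv_join_nil (l : List (List Char)) : PySem.Chars.join [] l = l.flatten := by
  induction l with
  | nil => rfl
  | cons h t ih =>
    cases t with
    | nil => simp [PySem.Chars.join, List.intercalate]
    | cons b u =>
      simp only [PySem.Chars.join, List.intercalate, List.intersperse] at *
      simp_all

-- an already-rstripped string strips to empty iff it is empty (A tests strip, B tests the string itself)
lemma pv_strip_rstrip_nil_iff (s : List Char) :
    PySem.Chars.strip (PySem.Chars.rstrip s) = [] ↔ PySem.Chars.rstrip s = [] := by
  constructor
  · intro h
    have hall : ∀ x ∈ PySem.Chars.rstrip s, PySem.Chars.isspace x = true := by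
      intro x hx
      have h2 : ∀ y ∈ PySem.Chars.lstrip (PySem.Chars.rstrip s), PySem.Chars.isspace y = true := by
        intro y hy
        have : (List.dropWhile PySem.Chars.isspace (PySem.Chars.lstrip (PySem.Chars.rstrip s)).reverse) = [] := by
          simpa [PySem.Chars.strip, PySem.Chars.rstrip] using h
        rw [List.dropWhile_eq_nil_iff] at this
        exact this y (by simpa using hy)
      rw [← List.takeWhile_append_dropWhile (p := PySem.Chars.isspace) (l := PySem.Chars.rstrip s)] at hx
      rcases List.mem_append.mp hx with h1 | h1
      · exact List.mem_takeWhile_imp h1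
      · exact h2 x h1
    have : List.dropWhile PySem.Chars.isspace s.reverse = [] := by
      cases hd : List.dropWhile PySem.Chars.isspace s.reverse with
      | nil => rfl
      | cons a t =>
        have hna := List.head_dropWhile_not (p := PySem.Chars.isspace) (l := s.reverse) (by simp [hd])
        have ha : PySem.Chars.isspace a = true := by
          apply hall a
          simp [PySem.Chars.rstrip, hd]
        simp [hd] at hna; simp [hna] at ha
    simp [PySem.Chars.rstrip, this]
  · intro h; rw [h]; rfl

-- both sides pad the same way
lemma pv_pad_eq (cs : List Char) :
    (if cs.length < 80 then cs ++ List.replicate (80 - cs.length) ' ' else cs)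
      = cs ++ List.replicate (80 - cs.length) ' ' := by
  split
  · rfl
  · next h =>
    have h0 : 80 - cs.length = 0 := by omega
    simp [h0]

lemma pv_pad_len (cs : List Char) : 7 ≤ (cs ++ List.replicate (80 - cs.length) ' ').length := by
  simp [List.length_append]
  omega

-- A's loop body does nothing exactly when B's extractor rejects the line
lemma pv_stepA_none (acc : List (List Char)) (line : String) (he : pvExtract line = none) :
    pvStepA acc line = acc := by
  simp only [pvExtract] at he
  simp only [pvStepA]
  rw [pv_pad_eq, if_pos (pv_pad_len line.toList)]
  by_cases hc : ((line.toList ++ List.replicate (80 - line.toList.length) ' ').getD 6 ' ' == '*'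
      || (line.toList ++ List.replicate (80 - line.toList.length) ' ').getD 6 ' ' == '/') = true
  · rw [if_pos hc]
  · rw [if_neg hc] at he
    rw [if_neg hc]
    have hs : PySem.Chars.rstrip (PySem.List.slice (line.toList ++ List.replicate (80 - line.toList.length) ' ') (some 7) (some 72)) = [] := by
      by_contra hne
      rw [if_neg (by simpa using hne)] at he
      cases he
    rw [if_pos (by simpa using (pv_strip_rstrip_nil_iff _).mpr hs)]

-- on an accepted line, A's loop body is B's merge step, through pvFlush
lemma pv_stepA_some (res : List (List Char)) (g : Option (List (List Char)))
    (line : String) (ind : Char) (src : List Char)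
    (hg : g = none → res = []) (he : pvExtract line = some (ind, src)) :
    pvStepA (pvFlush (res, g)) line = pvFlush (pvMerge (res, g) (ind, src)) := by
  simp only [pvExtract] at he
  simp only [pvStepA]
  rw [pv_pad_eq, if_pos (pv_pad_len line.toList)]
  by_cases hc : ((line.toList ++ List.replicate (80 - line.toList.length) ' ').getD 6 ' ' == '*'
      || (line.toList ++ List.replicate (80 - line.toList.length) ' ').getD 6 ' ' == '/') = true
  · rw [if_pos hc] at he; cases he
  rw [if_neg hc] at he
  rw [if_neg hc]
  by_cases hs : (PySem.Chars.rstrip (PySem.List.slice (line.toList ++ List.replicate (80 - line.toList.length) ' ') (some 7) (some 72)) == ([] : List Char)) = true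
  · rw [if_pos hs] at he; cases he
  rw [if_neg hs] at he
  have hpair : (line.toList ++ List.replicate (80 - line.toList.length) ' ').getD 6 ' ' = ind ∧
      PySem.Chars.rstrip (PySem.List.slice (line.toList ++ List.replicate (80 - line.toList.length) ' ') (some 7) (some 72)) = src := by
    simpa using he
  obtain ⟨hind, hsrc⟩ := hpair
  rw [if_neg (show ¬(PySem.Chars.strip (PySem.Chars.rstrip (PySem.List.slice (line.toList ++ List.replicate (80 - line.toList.length) ' ') (some 7) (some 72))) == ([] : List Char)) = true by
    simp only [beq_iff_eq] at hs ⊢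
    exact fun h => hs ((pv_strip_rstrip_nil_iff _).mp h))]
  rw [hind, hsrc]
  cases g with
  | none =>
    have hres : res = [] := hg rfl
    subst hres
    simp [pvFlush, pvMerge]
  | some gs =>
    by_cases hdash : ind = '-'
    · subst hdash
      simp [pvFlush, pvMerge, pv_join_nil, List.flatten_append]
    · simp [pvFlush, pvMerge, pv_join_nil, hdash]

-- main loop invariant: A's fold over lines tracks B's fold over the extracted units
lemma pv_loop_eq (lines : List String) (res : List (List Char)) (g : Option (List (List Char)))
    (hg : g = none → res = []) :
    lines.foldl pvStepA (pvFlush (res, g))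
      = pvFlush ((lines.filterMap pvExtract).foldl pvMerge (res, g)) := by
  induction lines generalizing res g with
  | nil => rfl
  | cons line rest ih =>
    cases he : pvExtract line with
    | none =>
      simp only [List.foldl_cons, List.filterMap_cons, he]
      rw [pv_stepA_none _ _ he]
      exact ih res g hg
    | some u =>
      obtain ⟨ind, src⟩ := u
      simp only [List.foldl_cons, List.filterMap_cons, he]
      rw [pv_stepA_some res g line ind src hg he]
      have hmerge : ∃ res' g', pvMerge (res, g) (ind, src) = (res', some g') := by
        unfold pvMerge
        split_ifs with h
        · cases g with
          | none => simp at h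
          | some gs => exact ⟨res, _, rfl⟩
        · exact ⟨_, _, rfl⟩
      obtain ⟨res', g', hm⟩ := hmerge
      rw [hm]
      exact ih res' (some g') (by simp)

-- ===== VERDICT (by name: the statement is the Claim_ definition above) =====
theorem handle_fixed_format_py_spec : Claim_equal_handle_fixed_format_py := by
  intro lines warnings _
  show _ = _
  unfold handle_fixed_format_py handle_fixed_format_py_alt
  exact congrArg (List.map (fun cs => String.ofList cs)) (pv_loop_eq lines [] none (fun _ => rfl))
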